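-- pv_equiv track=rewrite | github.com/tnakamot/dstat-plot | dstat_plot.py | is_column_for_cpu_usage
-- ===== SOURCE A (Python) =====
-- def is_column_for_cpu_usage(column_name):
--     cpu_ids = ['total'] + list(range(128))
--     suffixes = ['usr', 'sys', 'idl', 'wai', 'stl']
--
--     for cpu_id in cpu_ids:
--         if cpu_id == 'total':
--             prefix = 'total cpu usage:'
--         else:
--             prefix = f'cpu{cpu_id} usage:'
--
--         for suffix in suffixes:
--             if column_name == f'{prefix}{suffix}':
--                 return True
--     return False
-- ===== SOURCE B (Python) =====
-- def is_column_for_cpu_usage(column_name):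
--     # Parse the name instead of scanning all 645 candidate strings.
--     head, _sep, tail = column_name.partition(':')
--     if tail not in ('usr', 'sys', 'idl', 'wai', 'stl'):
--         return False
--     if head == 'total cpu usage':
--         return True
--     if not (head.startswith('cpu') and head.endswith(' usage')):
--         return False
--     d = head[3:-6]
--     return d.isdigit() and str(int(d)) == d and 0 <= int(d) < 128
-- ===== Notes on version B (the rewrite author's own statement) =====
-- stated objective: simpler
-- what changed: Replaces the nested scan over all 645 candidate names with a single decompose-and-validate parse: split the name at the first colon, check the suffix part against the five suffix literals, then accept the total-cpu label or a prefix carrying a canonical decimal cpu id below 128.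
import Mathlib
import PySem

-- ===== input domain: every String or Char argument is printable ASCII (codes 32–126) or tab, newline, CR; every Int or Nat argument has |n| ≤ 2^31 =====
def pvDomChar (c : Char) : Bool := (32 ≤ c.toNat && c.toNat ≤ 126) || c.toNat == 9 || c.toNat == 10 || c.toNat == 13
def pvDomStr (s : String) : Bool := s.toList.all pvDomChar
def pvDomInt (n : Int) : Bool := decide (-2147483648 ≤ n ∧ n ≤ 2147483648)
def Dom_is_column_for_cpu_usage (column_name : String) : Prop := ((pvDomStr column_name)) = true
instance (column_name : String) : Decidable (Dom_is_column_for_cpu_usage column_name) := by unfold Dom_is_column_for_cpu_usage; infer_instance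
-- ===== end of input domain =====

-- B parses the column name (partition at the first ':' and validate the two parts)
-- instead of A's scan over all 645 candidate strings; return values proved equal on every input.

-- ===== PORT A =====
-- helpers for A: the candidate ids ('total' modelled as none, range(128) as some n),
-- the five suffixes, and the prefix built for each id
def pvCpuIds : List (Option Int) := none :: (PySem.List.pyRange 0 128 1).map some
def pvSuffixes : List (List Char) :=
  ["usr".toList, "sys".toList, "idl".toList, "wai".toList, "stl".toList]
def pvPrefix (cpu_id : Option Int) : List Char :=
  match cpu_id with
  | none => "total cpu usage:".toList
  | some n => "cpu".toList ++ PySem.Int.toChars n ++ " usage:".toList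
-- the two nested for-loops with early 'return True' = any over cpu_ids / suffixes
def pvACore (cs : List Char) : Bool :=
  pvCpuIds.any fun cpu_id =>
    pvSuffixes.any fun suffix => cs == pvPrefix cpu_id ++ suffix
def is_column_for_cpu_usage (column_name : String) : Bool :=
  pvACore column_name.toList

-- ===== PORT B =====
-- helper for B: column_name.partition(':') (head, and the part after the first ':' when present)
def pvPartitionColon (cs : List Char) : List Char × Option (List Char) :=
  match cs with
  | [] => ([], none)
  | c :: rest =>
    if c = ':' then ([], some rest)
    else
      let p := pvPartitionColon rest
      (c :: p.1, p.2)
-- B's validation of the two parts (suffix membership, then the head check)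
def pvTailCheck (head t : List Char) : Bool :=
  if ¬ pvSuffixes.contains t then false
    else if head = "total cpu usage".toList then true
    else if ¬ (PySem.Chars.startswith head "cpu".toList
               && PySem.Chars.endswith head " usage".toList) then false
    else
      let d := PySem.List.slice head (some 3) (some (-6))
      PySem.Chars.strIsdigit d &&
        match PySem.Int.ofChars? d with
        | some n => PySem.Int.toChars n == d && decide (0 ≤ n) && decide (n < 128)
        | none => false

def pvBCore (cs : List Char) : Bool :=
  match pvPartitionColon cs with
  | (_, none) => false
  | (head, some t) => pvTailCheck head t

def is_column_for_cpu_usage_alt (column_name : String) : Bool :=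
  pvBCore column_name.toList

-- ===== PRECONDITION & SPEC =====
def Spec_is_column_for_cpu_usage (column_name : String) (out : Bool) : Prop := out = is_column_for_cpu_usage_alt column_name
instance (column_name : String) (out : Bool) : Decidable (Spec_is_column_for_cpu_usage column_name out) := by unfold Spec_is_column_for_cpu_usage; infer_instance

-- ===== CLAIM (what is proved, stated in full; the proofs are below) =====
def Claim_equal_is_column_for_cpu_usage : Prop := ∀ (column_name : String), Dom_is_column_for_cpu_usage column_name → Spec_is_column_for_cpu_usage column_name (is_column_for_cpu_usage column_name)

-- ===== LEMMAS AND PROOFS =====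

theorem pv_clamp_neg6 (n : Nat) : PySem.List.clampIdx n (-6) = n - 6 := by
  simp only [PySem.List.clampIdx]
  split_ifs <;> omega

theorem pv_clamp_3 (n : Nat) : PySem.List.clampIdx n 3 = min 3 n := by
  simp only [PySem.List.clampIdx]
  split_ifs <;> omega

-- "cpu" + m + " usage" sliced [3:-6] gives back m
theorem pv_slice_shape (m : List Char) :
    PySem.List.slice ("cpu".toList ++ m ++ " usage".toList) (some 3) (some (-6)) = m := by
  have hml : ("cpu".toList ++ m ++ " usage".toList).length = m.length + 9 := by simp
  simp only [PySem.List.slice, hml]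
  have c1 : PySem.List.clampIdx (m.length + 9) (-6) = m.length + 3 := by
    simp only [PySem.List.clampIdx]; split_ifs <;> omega
  have c2 : PySem.List.clampIdx (m.length + 9) 3 = 3 := by
    simp only [PySem.List.clampIdx]; split_ifs <;> omega
  rw [c1, c2]
  have hd : ("cpu".toList ++ m ++ " usage".toList).drop 3 = m ++ " usage".toList := by
    rw [List.append_assoc]
    have l3 : ("cpu".toList).length = 3 := by decide
    rw [← l3, List.drop_left]
  rw [hd]
  have : m.length + 3 - 3 = m.length := by omega
  rw [this]
  exact List.take_left

-- partition decomposes at the first ':'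
theorem pvPartitionColon_some {cs h t : List Char}
    (hp : pvPartitionColon cs = (h, some t)) : cs = h ++ ':' :: t := by
  induction cs generalizing h with
  | nil => simp [pvPartitionColon] at hp
  | cons c rest ih =>
    by_cases hc : c = ':'
    · simp only [pvPartitionColon, if_pos hc, Prod.mk.injEq, Option.some.injEq] at hp
      obtain ⟨h1, h2⟩ := hp
      subst h1; subst h2
      rw [hc]; rfl
    · simp only [pvPartitionColon, if_neg hc, Prod.mk.injEq] at hp
      obtain ⟨h1, h2⟩ := hp
      subst h1
      have hrec : pvPartitionColon rest = ((pvPartitionColon rest).1, some t) := by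
        rw [← h2]
      rw [List.cons_append, ← ih hrec]

-- and conversely, rebuilding from a ':'-free head
theorem pvPartitionColon_append {h t : List Char} (hnc : ':' ∉ h) :
    pvPartitionColon (h ++ ':' :: t) = (h, some t) := by
  induction h with
  | nil => simp [pvPartitionColon]
  | cons c r ih =>
    have hc : c ≠ ':' := fun e => hnc (by simp [e])
    have ihr := ih (fun m => hnc (List.mem_cons_of_mem _ m))
    simp [pvPartitionColon, hc, ihr]

-- a head accepted by B's cpu branch has the shape "cpu" + digits + " usage"
theorem pv_head_shape {h : List Char}
    (hst : PySem.Chars.startswith h "cpu".toList = true)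
    (hen : PySem.Chars.endswith h " usage".toList = true)
    (hne : PySem.List.slice h (some 3) (some (-6)) ≠ []) :
    h = "cpu".toList ++ PySem.List.slice h (some 3) (some (-6)) ++ " usage".toList := by
  obtain ⟨r, hr⟩ := (PySem.Chars.startswith_iff h _).1 hst
  obtain ⟨q, hq⟩ := (PySem.Chars.endswith_iff h _).1 hen
  have hql : q.length + 6 = h.length := by
    have := congrArg List.length hq
    simpa using this
  have hlen : 10 ≤ h.length := by
    by_contra hl
    apply hne
    apply List.eq_nil_of_length_eq_zero
    rw [PySem.List.length_slice, pv_clamp_neg6, pv_clamp_3]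
    omega
  have hcq : "cpu".toList <+: q :=
    List.prefix_of_prefix_length_le ⟨r, hr⟩ ⟨_, hq⟩ (by simp; omega)
  obtain ⟨m, hm⟩ := hcq
  have hh : h = "cpu".toList ++ m ++ " usage".toList := by
    rw [← hq, ← hm]
  rw [hh, pv_slice_shape]

theorem pv_backward : ∀ cs, pvBCore cs = true → pvACore cs = true := by
  intro cs hb
  unfold pvBCore at hb
  rcases hp : pvPartitionColon cs with ⟨h, t?⟩
  rw [hp] at hb
  cases t? with
  | none => simp at hb
  | some t =>
    have hcs : cs = h ++ ':' :: t := pvPartitionColon_some hp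
    replace hb : pvTailCheck h t = true := hb
    unfold pvTailCheck at hb
    simp only [Bool.not_eq_true] at hb
    split_ifs at hb with h1 h2 h3
    · -- total case
      simp only [pvACore, List.any_eq_true]
      refine ⟨none, by simp [pvCpuIds], t, by simpa using h1, ?_⟩
      rw [beq_iff_eq, hcs, h2]
      rfl
    · -- cpu case
      rw [Bool.and_eq_true] at hb
      obtain ⟨hdig, hb⟩ := hb
      cases hof : PySem.Int.ofChars? (PySem.List.slice h (some 3) (some (-6))) with
      | none => rw [hof] at hb; simp at hb
      | some n =>
        rw [hof] at hb
        simp only [Bool.and_eq_true, beq_iff_eq, decide_eq_true_eq] at hb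
        obtain ⟨⟨htc, hn0⟩, hn128⟩ := hb
        have hne : PySem.List.slice h (some 3) (some (-6)) ≠ [] := by
          intro he
          rw [he] at hdig
          exact absurd hdig (by decide)
        have hse : (PySem.Chars.startswith h "cpu".toList
            && PySem.Chars.endswith h " usage".toList) = true := by
          revert h3
          cases (PySem.Chars.startswith h "cpu".toList
            && PySem.Chars.endswith h " usage".toList) <;> simp
        rw [Bool.and_eq_true] at hse
        have hh := pv_head_shape hse.1 hse.2 hne
        simp only [pvACore, List.any_eq_true]
        refine ⟨some n, ?_, t, by simpa using h1, ?_⟩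
        · simp only [pvCpuIds, List.mem_cons, List.mem_map]
          exact Or.inr ⟨n, (PySem.List.mem_pyRange_one).2 ⟨hn0, hn128⟩, rfl⟩
        · rw [beq_iff_eq, hcs, hh, ← htc]
          simp only [pvPrefix, List.append_assoc]
          rfl

-- the ids 0..127 written out by str() are canonical digit strings that int() reads back
set_option maxHeartbeats 1000000 in
theorem pv_digit_facts :
    ((PySem.List.pyRange 0 128 1).all fun n =>
      PySem.Chars.strIsdigit (PySem.Int.toChars n)
      && (PySem.Int.ofChars? (PySem.Int.toChars n) == some n)
      && !((PySem.Int.toChars n).contains ':')) = true := by decide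

theorem pv_forward : ∀ cs, pvACore cs = true → pvBCore cs = true := by
  intro cs ha
  simp only [pvACore, List.any_eq_true, beq_iff_eq] at ha
  obtain ⟨id, hid, suf, hsuf, rfl⟩ := ha
  cases id with
  | none =>
    unfold pvBCore
    rw [show pvPrefix none ++ suf = "total cpu usage".toList ++ ':' :: suf from rfl]
    rw [pvPartitionColon_append (by decide)]
    show pvTailCheck "total cpu usage".toList suf = true
    unfold pvTailCheck
    simp [hsuf]
  | some n =>
    have hn := hid
    simp only [pvCpuIds, List.mem_cons, List.mem_map, Option.some.injEq,
      reduceCtorEq, false_or] at hn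
    obtain ⟨n', hn', rfl⟩ := hn
    have hf := (List.all_eq_true).1 pv_digit_facts n' hn'
    simp only [Bool.and_eq_true, beq_iff_eq, Bool.not_eq_true'] at hf
    obtain ⟨⟨hdig, hof⟩, hnc⟩ := hf
    have hrange := (PySem.List.mem_pyRange_one).1 hn'
    have hcs : pvPrefix (some n') ++ suf
        = ("cpu".toList ++ PySem.Int.toChars n' ++ " usage".toList) ++ ':' :: suf := by
      simp only [pvPrefix, List.append_assoc]
      rw [List.append_right_inj, List.append_right_inj]
      rfl
    have hmem : ':' ∉ "cpu".toList ++ PySem.Int.toChars n' ++ " usage".toList := by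
      intro hm
      simp only [List.mem_append] at hm
      rcases hm with (hm | hm) | hm
      · exact absurd hm (by decide)
      · rw [← List.contains_iff_mem] at hm
        rw [hm] at hnc; exact absurd hnc (by decide)
      · exact absurd hm (by decide)
    unfold pvBCore
    rw [hcs, pvPartitionColon_append hmem]
    show pvTailCheck ("cpu".toList ++ PySem.Int.toChars n' ++ " usage".toList) suf = true
    unfold pvTailCheck
    have hcont : pvSuffixes.contains suf = true := by
      rw [List.contains_iff_mem]; exact hsuf
    by_cases htot : ("cpu".toList ++ PySem.Int.toChars n' ++ " usage".toList)
        = "total cpu usage".toList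
    · rw [if_neg (not_not_intro hcont), if_pos htot]
    · have hsw : PySem.Chars.startswith
          ("cpu".toList ++ PySem.Int.toChars n' ++ " usage".toList) "cpu".toList = true := by
        rw [PySem.Chars.startswith_iff]
        exact ⟨PySem.Int.toChars n' ++ " usage".toList, by simp⟩
      have hew : PySem.Chars.endswith
          ("cpu".toList ++ PySem.Int.toChars n' ++ " usage".toList) " usage".toList = true := by
        rw [PySem.Chars.endswith_iff]
        exact ⟨"cpu".toList ++ PySem.Int.toChars n', by simp⟩
      have hse : (PySem.Chars.startswith
            ("cpu".toList ++ PySem.Int.toChars n' ++ " usage".toList) "cpu".toList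
          && PySem.Chars.endswith
            ("cpu".toList ++ PySem.Int.toChars n' ++ " usage".toList) " usage".toList) = true := by
        rw [hsw, hew]; rfl
      rw [if_neg (not_not_intro hcont), if_neg htot, if_neg (not_not_intro hse)]
      simp only [pv_slice_shape, hdig, hof, Bool.true_and, beq_self_eq_true]
      simp [hrange.1, hrange.2]

-- ===== VERDICT (by name: the statement is the Claim_ definition above) =====
theorem is_column_for_cpu_usage_spec : Claim_equal_is_column_for_cpu_usage := by
  intro s _
  unfold Spec_is_column_for_cpu_usage is_column_for_cpu_usage is_column_for_cpu_usage_alt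
  by_cases hb : pvBCore s.toList = true
  · rw [hb, pv_backward _ hb]
  · have ha : pvACore s.toList = false := by
      cases hA : pvACore s.toList
      · rfl
      · exact absurd (pv_forward _ hA) hb
    rw [ha, Bool.eq_false_iff.mpr hb]
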